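-- pv_equiv track=rewrite | github.com/simonevadi/SoTeXs | simulation/12/build_params.py | make_slopes_params
-- ===== SOURCE A (Python) =====
-- def make_slopes_params(param_dict):
--     new_dict = {}
--     for key, value in param_dict.items():
--         new_dict[key] = [0]
--         new_dict[key].append(value[1])  # single value for the parameter
--     for key,value_tuple in param_dict.items():
--         values = value_tuple[0]
--         single_value = value_tuple[1]
--         for index, value in enumerate(values):
--             for new_key in new_dict.keys():
--                 if new_key == key:
--                     new_dict[new_key].append(value)
--                 else:
--                     new_dict[new_key].append(0)
--     return new_dict
-- ===== SOURCE B (Python) =====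
-- def make_slopes_params(param_dict):
--     # Build each key's full row in one shot: [0, single], zeros before its
--     # block, its own values, zeros after -- instead of column-wise appends.
--     items = list(param_dict.items())
--     total = sum(len(value_tuple[0]) for value_tuple in param_dict.values())
--     new_dict = {}
--     offset = 0
--     for key, (values, single) in items:
--         n = len(values)
--         new_dict[key] = [0, single] + [0] * offset + list(values) + [0] * (total - offset - n)
--         offset += n
--     return new_dict
-- ===== Notes on version B (the rewrite author's own statement) =====
-- stated objective: alternative
-- what changed: Each key's row is built in one concatenation ([0,single] + leading zeros + its values + trailing zeros) from a running prefix offset and the grand total, replacing A's column-wise interleaved appends that re-scan every key for every single value.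
import Mathlib
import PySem

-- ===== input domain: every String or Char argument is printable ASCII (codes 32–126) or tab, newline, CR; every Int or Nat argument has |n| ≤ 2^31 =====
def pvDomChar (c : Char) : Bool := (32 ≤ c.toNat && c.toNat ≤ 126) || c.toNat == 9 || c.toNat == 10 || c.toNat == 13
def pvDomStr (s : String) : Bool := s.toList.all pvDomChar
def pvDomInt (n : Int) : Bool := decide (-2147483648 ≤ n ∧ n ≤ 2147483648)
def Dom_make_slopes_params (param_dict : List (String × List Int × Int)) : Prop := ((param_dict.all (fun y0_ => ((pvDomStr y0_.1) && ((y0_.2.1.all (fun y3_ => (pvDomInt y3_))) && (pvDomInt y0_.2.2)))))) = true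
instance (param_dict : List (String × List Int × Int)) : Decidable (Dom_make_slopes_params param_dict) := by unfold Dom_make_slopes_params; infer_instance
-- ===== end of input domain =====

-- B builds each key's row by one concatenation from a running prefix offset, instead of A's
-- column-wise interleaved appends over all keys (objective: alternative decomposition).


-- ===== PORT A =====
-- literal transliteration of A: first loop seeds new_dict[key] = [0]; .append(value[1]);
-- second loop appends, per value, the value to its own key's list and 0 to every other key's list.
def make_slopes_params (param_dict : List (String × List Int × Int)) : List (String × List Int) :=
  let new_dict : PySem.Dict String (List Int) :=
    param_dict.foldl (fun d kv =>
      (d.insert kv.1 [0]).modify kv.1 [] (fun xs => xs ++ [kv.2.2])) PySem.Dict.empty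
  let new_dict :=
    param_dict.foldl (fun d kv =>
      kv.2.1.foldl (fun d v =>
        d.keys.foldl (fun d nk =>
          if nk == kv.1 then d.modify nk [] (fun xs => xs ++ [v])
          else d.modify nk [] (fun xs => xs ++ [(0 : Int)])) d) d) new_dict
  new_dict.items

-- ===== PORT B =====
-- transliteration of Source B: running offset, each key's row built as one concatenation.
def make_slopes_params_alt (param_dict : List (String × List Int × Int)) : List (String × List Int) :=
  let total : Nat := (param_dict.map (fun kv => kv.2.1.length)).sum
  (param_dict.foldl (fun (acc : List (String × List Int) × Nat) kv =>
      (acc.1 ++ [(kv.1, [0, kv.2.2] ++ List.replicate acc.2 (0 : Int) ++ kv.2.1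
                          ++ List.replicate (total - acc.2 - kv.2.1.length) (0 : Int))],
       acc.2 + kv.2.1.length)) ([], 0)).1

-- ===== PRECONDITION & SPEC =====
-- Pre_ excludes association lists with duplicate keys: A's argument is a Python dict, in which
-- duplicates are collapsed before A ever runs, so such lists do not represent an input of A.
def Pre_make_slopes_params (param_dict : List (String × List Int × Int)) : Prop :=
  (param_dict.map (fun kv => kv.1.toList)).Nodup
instance (param_dict : List (String × List Int × Int)) : Decidable (Pre_make_slopes_params param_dict) := by unfold Pre_make_slopes_params; infer_instance

def pvWitness_make_slopes_params : (List (String × List Int × Int)) :=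
  [("a", ([1, 2], 5)), ("b", ([3], 7))]

def Spec_make_slopes_params (param_dict : List (String × List Int × Int)) (out : List (String × List Int)) : Prop := out = make_slopes_params_alt param_dict
instance (param_dict : List (String × List Int × Int)) (out : List (String × List Int)) : Decidable (Spec_make_slopes_params param_dict out) := by unfold Spec_make_slopes_params; infer_instance

-- ===== CLAIM (what is proved, stated in full; the proofs are below) =====
def Claim_equal_make_slopes_params : Prop := ∀ (param_dict : List (String × List Int × Int)), Dom_make_slopes_params param_dict → Pre_make_slopes_params param_dict → Spec_make_slopes_params param_dict (make_slopes_params param_dict)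

-- ===== LEMMAS AND PROOFS =====

-- the column suffix appended to key k's row by A's second loop over pd
def pvCols (pd : List (String × List Int × Int)) (k : String) : List Int :=
  pd.flatMap (fun kv => kv.2.1.map (fun v => if k == kv.1 then v else 0))

-- B's fold, unrolled to a recursion on the item list with an explicit offset
def pvBuild (total : Nat) : List (String × List Int × Int) → Nat → List (String × List Int)
  | [], _ => []
  | kv :: t, off =>
      (kv.1, [0, kv.2.2] ++ List.replicate off (0 : Int) ++ kv.2.1
               ++ List.replicate (total - off - kv.2.1.length) (0 : Int))
        :: pvBuild total t (off + kv.2.1.length)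

theorem pvB_fold (total : Nat) (l : List (String × List Int × Int))
    (acc : List (String × List Int)) (off : Nat) :
    (l.foldl (fun (acc : List (String × List Int) × Nat) kv =>
      (acc.1 ++ [(kv.1, [0, kv.2.2] ++ List.replicate acc.2 (0 : Int) ++ kv.2.1
                          ++ List.replicate (total - acc.2 - kv.2.1.length) (0 : Int))],
       acc.2 + kv.2.1.length)) (acc, off)).1 = acc ++ pvBuild total l off := by
  induction l generalizing acc off with
  | nil => simp [pvBuild]
  | cons kv t ih =>
      rw [List.foldl_cons]
      exact (ih _ _).trans (by simp [pvBuild, List.append_assoc])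

-- one insert of [0]; .append(single) step of A's first loop collapses to a single insert
theorem pvSeed (d : PySem.Dict String (List Int)) (k : String) (s : Int) :
    (d.insert k [0]).modify k [] (fun xs => xs ++ [s]) = d.insert k [0, s] := by
  simp [PySem.Dict.modify, PySem.Dict.insert_insert_self]

-- A's innermost loop (one value v of key `key`): appends v to key's row, 0 to every other row
theorem pvColstep (key : String) (v : Int) (l' : List String) :
    ∀ (d : PySem.Dict String (List Int)), l'.Nodup → (∀ x ∈ l', d.contains x = true) →
    (l'.foldl (fun d nk =>
        if nk == key then d.modify nk [] (fun xs => xs ++ [v])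
        else d.modify nk [] (fun xs => xs ++ [(0 : Int)])) d).keys = d.keys ∧
    ∀ k, (l'.foldl (fun d nk =>
        if nk == key then d.modify nk [] (fun xs => xs ++ [v])
        else d.modify nk [] (fun xs => xs ++ [(0 : Int)])) d).getD k []
      = if k ∈ l' then d.getD k [] ++ [if k == key then v else 0] else d.getD k [] := by
  induction l' with
  | nil => intro d _ _; simp
  | cons x t ih =>
      intro d hnd hc
      have hcx : d.contains x = true := hc x (by simp)
      have hstep : (if x == key then d.modify x [] (fun xs => xs ++ [v])
                    else d.modify x [] (fun xs => xs ++ [(0 : Int)]))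
                 = d.modify x [] (fun xs => xs ++ [if x == key then v else 0]) := by
        by_cases h : x == key <;> simp [h]
      rw [List.foldl_cons, hstep]
      have hkeys1 : (d.modify x [] (fun xs => xs ++ [if x == key then v else 0])).keys = d.keys := by
        rw [PySem.Dict.keys_modify, PySem.Dict.keys_insert_of_contains]
        exact hcx
      have hc1 : ∀ y ∈ t, (d.modify x [] (fun xs => xs ++ [if x == key then v else 0])).contains y = true := by
        intro y hy
        rw [PySem.Dict.contains_modify]
        simp [hc y (by simp [hy])]
      obtain ⟨hk2, hg2⟩ := ih _ hnd.of_cons hc1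
      refine ⟨by rw [hk2, hkeys1], ?_⟩
      intro k
      rw [hg2 k]
      have hxt : x ∉ t := (List.nodup_cons.mp hnd).1
      by_cases hkt : k ∈ t
      · have hkx : k ≠ x := fun h => hxt (h ▸ hkt)
        simp [hkt, PySem.Dict.getD_modify, hkx]
      · by_cases hkx : k = x
        · subst hkx
          simp [hkt]
        · simp [hkt, hkx, PySem.Dict.getD_modify]

-- A's inner loop over all values of one key
theorem pvInner (key : String) (vals : List Int) :
    ∀ (d : PySem.Dict String (List Int)), d.keys.Nodup →
    (vals.foldl (fun d v =>
        d.keys.foldl (fun d nk =>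
          if nk == key then d.modify nk [] (fun xs => xs ++ [v])
          else d.modify nk [] (fun xs => xs ++ [(0 : Int)])) d) d).keys = d.keys ∧
    ∀ k ∈ d.keys, (vals.foldl (fun d v =>
        d.keys.foldl (fun d nk =>
          if nk == key then d.modify nk [] (fun xs => xs ++ [v])
          else d.modify nk [] (fun xs => xs ++ [(0 : Int)])) d) d).getD k []
      = d.getD k [] ++ vals.map (fun v => if k == key then v else 0) := by
  induction vals with
  | nil => intro d _; simp
  | cons v vs ih =>
      intro d hnd
      obtain ⟨hk1, hg1⟩ := pvColstep key v d.keys d hnd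
        (fun x hx => (PySem.Dict.contains_iff_mem_keys _ _).mpr hx)
      rw [List.foldl_cons]
      obtain ⟨hk2, hg2⟩ := ih _ (hk1 ▸ hnd)
      refine ⟨by rw [hk2, hk1], ?_⟩
      intro k hk
      rw [hg2 k (by rw [hk1]; exact hk), hg1 k]
      simp [hk, List.append_assoc]

-- A's whole second loop
theorem pvOuter (l : List (String × List Int × Int)) :
    ∀ (d : PySem.Dict String (List Int)), d.keys.Nodup →
    (l.foldl (fun d kv =>
      kv.2.1.foldl (fun d v =>
        d.keys.foldl (fun d nk =>
          if nk == kv.1 then d.modify nk [] (fun xs => xs ++ [v])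
          else d.modify nk [] (fun xs => xs ++ [(0 : Int)])) d) d) d).keys = d.keys ∧
    ∀ k ∈ d.keys, (l.foldl (fun d kv =>
      kv.2.1.foldl (fun d v =>
        d.keys.foldl (fun d nk =>
          if nk == kv.1 then d.modify nk [] (fun xs => xs ++ [v])
          else d.modify nk [] (fun xs => xs ++ [(0 : Int)])) d) d) d).getD k []
      = d.getD k [] ++ pvCols l k := by
  induction l with
  | nil => intro d _; simp [pvCols]
  | cons kv t ih =>
      intro d hnd
      obtain ⟨hk1, hg1⟩ := pvInner kv.1 kv.2.1 d hnd
      rw [List.foldl_cons]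
      obtain ⟨hk2, hg2⟩ := ih _ (hk1 ▸ hnd)
      refine ⟨by rw [hk2, hk1], ?_⟩
      intro k hk
      rw [hg2 k (by rw [hk1]; exact hk), hg1 k hk]
      simp [pvCols, List.append_assoc]

-- a key occurring nowhere in pd collects only zeros
theorem pvCols_ne (pd : List (String × List Int × Int)) (k : String)
    (h : ∀ kv ∈ pd, k ≠ kv.1) :
    pvCols pd k = List.replicate ((pd.map (fun kv => kv.2.1.length)).sum) (0 : Int) := by
  induction pd with
  | nil => simp [pvCols]
  | cons kv t ih =>
      have hk : (k == kv.1) = false := by simpa using h kv (by simp)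
      have ih' := ih (fun kv' h' => h kv' (by simp [h']))
      simp only [pvCols, List.flatMap_cons] at ih' ⊢
      rw [ih', List.map_cons, List.sum_cons, List.replicate_add]
      congr 1
      simp [hk, List.map_const']

-- B's rows, described through A's column suffixes
theorem pvMain (suf : List (String × List Int × Int)) :
    ∀ pre : List (String × List Int × Int), ((pre ++ suf).map Prod.fst).Nodup →
    pvBuild (((pre ++ suf).map (fun kv => kv.2.1.length)).sum) suf
        ((pre.map (fun kv => kv.2.1.length)).sum)
      = suf.map (fun kv => (kv.1, ([0, kv.2.2] : List Int) ++ pvCols (pre ++ suf) kv.1)) := by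
  induction suf with
  | nil => intro pre _; simp [pvBuild]
  | cons kv t ih =>
      intro pre hnd
      have hnd' : (((pre ++ [kv]) ++ t).map Prod.fst).Nodup := by
        simpa [List.append_assoc] using hnd
      have hparts := hnd
      rw [List.map_append, List.map_cons, List.nodup_append] at hparts
      obtain ⟨hpre_nd, hcons_nd, hdisj⟩ := hparts
      have h1 : ∀ kv' ∈ pre, kv.1 ≠ kv'.1 := by
        intro kv' h' heq
        exact hdisj _ (List.mem_map_of_mem h') _ (by simp) heq.symm
      have h2 : ∀ kv' ∈ t, kv.1 ≠ kv'.1 := by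
        intro kv' h' heq
        exact (List.nodup_cons.mp hcons_nd).1 (heq ▸ List.mem_map_of_mem h')
      have hc1 : pvCols pre kv.1 = List.replicate ((pre.map (fun kv => kv.2.1.length)).sum) (0 : Int) :=
        pvCols_ne pre kv.1 h1
      have hc2 : pvCols t kv.1 = List.replicate ((t.map (fun kv => kv.2.1.length)).sum) (0 : Int) :=
        pvCols_ne t kv.1 h2
      have htot : (((pre ++ kv :: t).map (fun kv => kv.2.1.length)).sum)
            - ((pre.map (fun kv => kv.2.1.length)).sum) - kv.2.1.length
          = ((t.map (fun kv => kv.2.1.length)).sum) := by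
        rw [List.map_append, List.sum_append, List.map_cons, List.sum_cons]
        omega
      have hrow : pvCols (pre ++ kv :: t) kv.1
          = List.replicate ((pre.map (fun kv => kv.2.1.length)).sum) (0 : Int) ++ kv.2.1
              ++ List.replicate ((t.map (fun kv => kv.2.1.length)).sum) (0 : Int) := by
        simp only [pvCols, List.flatMap_append, List.flatMap_cons] at *
        rw [hc1, hc2]
        simp [List.append_assoc]
      have hT : (((pre ++ [kv]) ++ t).map (fun kv => kv.2.1.length)).sum
          = (((pre ++ kv :: t).map (fun kv => kv.2.1.length)).sum) := by
        simp [List.sum_append]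
      have hoff : (((pre ++ [kv]).map (fun kv => kv.2.1.length)).sum)
          = ((pre.map (fun kv => kv.2.1.length)).sum) + kv.2.1.length := by
        simp [List.sum_append]
      have iht := ih (pre ++ [kv]) hnd'
      rw [hT, hoff] at iht
      simp only [pvBuild, htot]
      rw [iht]
      refine List.cons_eq_cons.mpr ⟨?_, ?_⟩
      · dsimp only
        rw [hrow]
        simp [List.append_assoc]
      · apply List.map_congr_left
        intro kv' _
        have : (pre ++ [kv]) ++ t = pre ++ kv :: t := by simp
        rw [this]

theorem make_slopes_params_spec : Claim_equal_make_slopes_params := by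
  intro pd _ hpre0
  unfold Pre_make_slopes_params at hpre0
  have hpre : (pd.map Prod.fst).Nodup := by
    rw [show pd.map (fun kv => kv.1.toList) = (pd.map Prod.fst).map String.toList by
      simp [List.map_map]] at hpre0
    exact List.Nodup.of_map _ hpre0
  show make_slopes_params pd = make_slopes_params_alt pd
  unfold make_slopes_params make_slopes_params_alt
  -- seed dict: collapse insert-then-modify into a single insert
  rw [show (fun (d : PySem.Dict String (List Int)) (kv : String × List Int × Int) =>
        (d.insert kv.1 [0]).modify kv.1 [] (fun xs => xs ++ [kv.2.2]))
      = (fun d kv => d.insert kv.1 [0, kv.2.2]) from funext fun d => funext fun kv => pvSeed d kv.1 kv.2.2]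
  have hitems0 : (pd.foldl (fun d kv => d.insert kv.1 ([0, kv.2.2] : List Int)) PySem.Dict.empty).items
      = pd.map (fun kv => (kv.1, ([0, kv.2.2] : List Int))) := by
    have := PySem.Dict.items_foldl_insert_fresh pd Prod.fst
      (fun kv => ([0, kv.2.2] : List Int)) PySem.Dict.empty (by simp) hpre
    simpa using this
  have hkeys0 : (pd.foldl (fun d kv => d.insert kv.1 ([0, kv.2.2] : List Int)) PySem.Dict.empty).keys
      = pd.map Prod.fst := by
    simp only [PySem.Dict.keys, hitems0, List.map_map]
    rfl
  have hnd0 : (pd.foldl (fun d kv => d.insert kv.1 ([0, kv.2.2] : List Int)) PySem.Dict.empty).keys.Nodup := by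
    rw [hkeys0]; exact hpre
  obtain ⟨hk1, hg1⟩ := pvOuter pd _ hnd0
  -- A's result as a map over pd
  rw [PySem.Dict.items_eq_map_keys _ (by rw [hk1]; exact hnd0) ([] : List Int), hk1, hkeys0,
    List.map_map]
  have hA : pd.map ((fun k => (k, (pd.foldl (fun d kv =>
      kv.2.1.foldl (fun d v =>
        d.keys.foldl (fun d nk =>
          if nk == kv.1 then d.modify nk [] (fun xs => xs ++ [v])
          else d.modify nk [] (fun xs => xs ++ [(0 : Int)])) d) d)
        (pd.foldl (fun d kv => d.insert kv.1 ([0, kv.2.2] : List Int)) PySem.Dict.empty)).getD k []))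
        ∘ Prod.fst)
      = pd.map (fun kv => (kv.1, ([0, kv.2.2] : List Int) ++ pvCols pd kv.1)) := by
    apply List.map_congr_left
    intro kv hkv
    have hmem : kv.1 ∈ (pd.foldl (fun d kv => d.insert kv.1 ([0, kv.2.2] : List Int)) PySem.Dict.empty).keys := by
      rw [hkeys0]; exact List.mem_map_of_mem hkv
    have hg := hg1 kv.1 hmem
    have hd0 : (pd.foldl (fun d kv => d.insert kv.1 ([0, kv.2.2] : List Int)) PySem.Dict.empty).getD kv.1 []
        = [0, kv.2.2] := by
      apply PySem.Dict.getD_of_mem_items _ _ hnd0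
      rw [hitems0]
      exact List.mem_map_of_mem hkv
    simp only [Function.comp, hg, hd0]
  rw [hA]
  -- B's side
  have hB : (pd.foldl (fun (acc : List (String × List Int) × Nat) kv =>
      (acc.1 ++ [(kv.1, [0, kv.2.2] ++ List.replicate acc.2 (0 : Int) ++ kv.2.1
                          ++ List.replicate ((pd.map (fun kv => kv.2.1.length)).sum - acc.2 - kv.2.1.length) (0 : Int))],
       acc.2 + kv.2.1.length)) ([], 0)).1
      = pvBuild ((pd.map (fun kv => kv.2.1.length)).sum) pd 0 := by
    simpa using pvB_fold ((pd.map (fun kv => kv.2.1.length)).sum) pd [] 0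
  rw [hB]
  have := pvMain pd [] (by simpa using hpre)
  simpa using this.symm
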